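-- pv_equiv track=rewrite | github.com/codefuse-ai/CodeFuse-muAgent | muagent/prompt_manager/util.py | edges_to_graph_with_cycle_detection
-- ===== SOURCE A (Python) =====
-- from collections import defaultdict
--
-- class GraphCycleError(Exception):
--     """Custom exception for graph cycle detection."""
--     pass
--
-- def edges_to_graph_with_cycle_detection(intervals):
--     """Converts a list of intervals into a directed graph and checks for cycles.
--
--     Args:
--         intervals (list of tuple): List of intervals where each interval is defined by (start, end).
--
--     Returns:
--         tuple: A tuple containing a list of start nodes (nodes with indegree of 0) and the constructed graph.
--
--     Raises:
--         GraphCycleError: If the graph contains a cycle.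
--     """
--
--     graph = defaultdict(list)  # Adjacency list for the graph
--     indegree = defaultdict(int)  # Count of incoming edges for each node
--
--     # Build the graph and the indegree table
--     for start, end in intervals:
--         graph[start].append(end)  # Add directed edge from start to end
--         indegree[end] += 1  # Increment indegree of end node
--         # Ensure every node is in the graph (even nodes without outgoing edges)
--         if start not in indegree:
--             indegree[start] = 0  # Initialize indegree for start node
--
--     # Find all starting nodes (indegree of 0)
--     start_nodes = [node for node in indegree if indegree[node] == 0]
--
--     # Detect cycle in the graph
--     if detect_cycle(graph):
--         raise GraphCycleError("Graph contains a cycle!")  # Raise error if cycle is found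
--
--     return start_nodes, graph
--
-- def detect_cycle(graph):
--     """Detects if a directed graph contains a cycle using DFS.
--
--     Args:
--         graph (dict): The adjacency list of the graph.
--
--     Returns:
--         bool: True if a cycle is detected, False otherwise.
--     """
--
--     visited = set()  # To keep track of visited nodes
--     rec_stack = set()  # To keep track of nodes currently in the recursion stack
--
--     def dfs(node):
--         """Performs a DFS on the graph to detect cycles.
--
--         Args:
--             node: Current node being visited.
--
--         Returns:
--             bool: True if a cycle is detected.
--         """
--         # If node is in recursion stack, a cycle is found
--         if node in rec_stack:
--             return True
--         # If node is already visited, no need to check it again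
--         if node in visited:
--             return False
--
--         # Mark the current node as visited and add to recursion stack
--         visited.add(node)
--         rec_stack.add(node)
--
--         # Use list() to copy neighbors to avoid modifying while iterating
--         for neighbor in list(graph[node]):
--             if dfs(neighbor):  # Recursive call for each neighbor
--                 return True  # Cycle detected in the neighbor
--
--         # Remove the node from the recursion stack after visiting
--         rec_stack.remove(node)
--         return False  # No cycle detected in this path
--
--     # Iterate over each node in the graph to detect cycles
--     for node in list(graph.keys()):
--         if node not in visited:  # Proceed if the node hasn't been visited yet
--             if dfs(node):  # Start DFS
--                 return True  # Cycle found
--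
--     return False  # No cycles found in the graph
-- ===== SOURCE B (Python) =====
-- from collections import defaultdict
--
-- class GraphCycleError(Exception):
--     """Custom exception for graph cycle detection."""
--     pass
--
-- def edges_to_graph_with_cycle_detection(intervals):
--     graph = defaultdict(list)
--     indegree = defaultdict(int)
--     for start, end in intervals:
--         graph[start].append(end)
--         indegree[end] += 1
--         if start not in indegree:
--             indegree[start] = 0
--     start_nodes = [node for node in indegree if indegree[node] == 0]
--
--     # Cycle detection by iterative depth-first search with an explicit stack:
--     # each node is pushed once as (node, False) to expand it and once as
--     # (node, True) to close it; meeting a node that is still open means a cycle.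
--     visited = set()
--     on_path = set()
--     for root in list(graph.keys()):
--         stack = [(root, False)]
--         while stack:
--             node, closing = stack.pop()
--             if closing:
--                 on_path.discard(node)
--                 continue
--             if node in on_path:
--                 raise GraphCycleError("Graph contains a cycle!")
--             if node in visited:
--                 continue
--             visited.add(node)
--             on_path.add(node)
--             stack.append((node, True))
--             for neighbor in reversed(graph[node]):
--                 stack.append((neighbor, False))
--     return start_nodes, graph
-- ===== Notes on version B (the rewrite author's own statement) =====
-- stated objective: alternative
-- what changed: The recursive DFS cycle detector (helper dfs with visited/rec_stack sets) is replaced by an iterative depth-first search over an explicit stack of (node, closing) entries with an on-path set, detecting a cycle when a popped node is still open; the graph/indegree build and start-node collection are unchanged.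
import Mathlib
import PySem

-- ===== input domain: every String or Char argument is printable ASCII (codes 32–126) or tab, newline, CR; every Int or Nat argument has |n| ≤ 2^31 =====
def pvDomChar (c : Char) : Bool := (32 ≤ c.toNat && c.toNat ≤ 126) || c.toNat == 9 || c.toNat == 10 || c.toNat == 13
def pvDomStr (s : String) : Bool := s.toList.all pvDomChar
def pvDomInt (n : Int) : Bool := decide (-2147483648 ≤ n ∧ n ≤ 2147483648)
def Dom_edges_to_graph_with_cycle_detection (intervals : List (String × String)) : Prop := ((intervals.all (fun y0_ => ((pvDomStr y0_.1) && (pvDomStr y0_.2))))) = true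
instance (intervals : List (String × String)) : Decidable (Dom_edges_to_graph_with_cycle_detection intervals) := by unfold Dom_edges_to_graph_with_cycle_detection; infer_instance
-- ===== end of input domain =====

-- B replaces A's recursive DFS cycle detector by an iterative depth-first search with an
-- explicit stack of (node, closing) entries and an on-path set (objective: alternative).
-- Where the Pythons raise GraphCycleError (cyclic input, outside Pre_) both ports return ([], []).

-- ===== PORT A =====
-- A's dfs: fuelled mutual recursion (fuel = recursion depth; 2*len(intervals)+1 is enough
-- on acyclic inputs, proved below).  State: (cycle?, graph, visited, rec_stack); the
-- defaultdict lookup `graph[node]` inserts a missing key, hence the `if g.contains node` step.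
mutual
  def pvDfsA : Nat → PySem.Dict String (List String) → PySem.Set String → PySem.Set String → String →
      Bool × PySem.Dict String (List String) × PySem.Set String × PySem.Set String
    | 0, g, vis, rec, _ => (true, g, vis, rec)   -- fuel exhausted (never reached under Pre_)
    | fuel+1, g, vis, rec, node =>
      if PySem.Set.contains rec node then (true, g, vis, rec)
      else if PySem.Set.contains vis node then (false, g, vis, rec)
      else
        let vis' := PySem.Set.add vis node
        let rec' := PySem.Set.add rec node
        let nbrs := g.getD node []                                   -- list(graph[node])
        let g' := if g.contains node then g else g.insert node []    -- defaultdict inserts the missing key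
        match pvDfsAList fuel g' vis' rec' nbrs with
        | (true, g2, vis2, rec2) => (true, g2, vis2, rec2)
        | (false, g2, vis2, rec2) => (false, g2, vis2, PySem.Set.discard rec2 node)  -- rec_stack.remove(node)
  termination_by fuel _ _ _ _ => (fuel, 0)
  def pvDfsAList : Nat → PySem.Dict String (List String) → PySem.Set String → PySem.Set String → List String →
      Bool × PySem.Dict String (List String) × PySem.Set String × PySem.Set String
    | _, g, vis, rec, [] => (false, g, vis, rec)
    | fuel, g, vis, rec, n :: ns =>
      match pvDfsA fuel g vis rec n with
      | (true, g2, vis2, rec2) => (true, g2, vis2, rec2)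
      | (false, g2, vis2, rec2) => pvDfsAList fuel g2 vis2 rec2 ns
  termination_by fuel _ _ _ ns => (fuel, ns.length + 1)
end

-- detect_cycle's top loop: `for node in list(graph.keys()): if node not in visited: if dfs(node): return True`
def pvDetectLoop : Nat → PySem.Dict String (List String) → PySem.Set String → PySem.Set String → List String →
    Bool × PySem.Dict String (List String)
  | _, g, _, _, [] => (false, g)
  | fuel, g, vis, rec, k :: ks =>
    if PySem.Set.contains vis k then pvDetectLoop fuel g vis rec ks
    else match pvDfsA fuel g vis rec k with
      | (true, g2, _, _) => (true, g2)
      | (false, g2, vis2, rec2) => pvDetectLoop fuel g2 vis2 rec2 ks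

def edges_to_graph_with_cycle_detection (intervals : List (String × String)) : List String × (List (String × List String)) :=
  let gi := intervals.foldl
    (fun (acc : PySem.Dict String (List String) × PySem.Dict String Int) se =>
      let g := acc.1.insert se.1 (acc.1.getD se.1 [] ++ [se.2])
      let ind := acc.2.insert se.2 (acc.2.getD se.2 0 + 1)
      let ind2 := if ind.contains se.1 then ind else ind.insert se.1 0
      (g, ind2))
    (PySem.Dict.mk [], PySem.Dict.mk [])
  let startNodes := gi.2.keys.filter (fun node => gi.2.getD node 0 == 0)
  match pvDetectLoop (2 * intervals.length + 1) gi.1 PySem.Set.empty PySem.Set.empty gi.1.keys with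
  | (true, _) => ([], [])     -- raise GraphCycleError (outside Pre_)
  | (false, g2) => (startNodes, g2.items)

-- ===== PORT B =====
-- B's iterative DFS.  The stack is kept top-first (Lean list head = Python stack end, where
-- pop/append operate); a (node, true) entry is Python's (node, True) closing marker.
-- Termination measure helpers, cited by decreasing_by.
def pvUniv (g : PySem.Dict String (List String)) : Finset String := (g.keys ++ g.values.flatten).toFinset
def pvU (g : PySem.Dict String (List String)) (stack : List (String × Bool)) : Finset String :=
  pvUniv g ∪ (stack.map (·.1)).toFinset

theorem pvGetD_mem_values_aux (l : List (String × List String)) (a b : String)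
    (h : b ∈ (PySem.Dict.mk l).getD a []) : b ∈ (l.map (·.2)).flatten := by
  induction l with
  | nil => simp [PySem.Dict.getD, PySem.Dict.get?] at h
  | cons p tl ih =>
    obtain ⟨k, v⟩ := p
    simp only [PySem.Dict.getD, PySem.Dict.get?_mk_cons] at h ih
    by_cases he : k == a
    · rw [if_pos he] at h
      simp only [Option.getD_some] at h
      simp only [List.map_cons, List.flatten_cons, List.mem_append]
      exact Or.inl h
    · rw [if_neg he] at h
      simp only [List.map_cons, List.flatten_cons, List.mem_append]
      exact Or.inr (ih h)

theorem pvGetD_mem_univ {g : PySem.Dict String (List String)} {a b : String}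
    (h : b ∈ g.getD a []) : b ∈ pvUniv g := by
  simp only [pvUniv, List.mem_toFinset, List.mem_append]
  right
  have hg : g = PySem.Dict.mk g.items := PySem.Dict.ext rfl
  have := pvGetD_mem_values_aux g.items a b (by rw [← hg]; exact h)
  simpa [PySem.Dict.values] using this

theorem pvUniv_insert_empty {g : PySem.Dict String (List String)} {node : String}
    (hk : ¬g.contains node = true) :
    pvUniv (g.insert node []) = insert node (pvUniv g) := by
  have hit : (g.insert node []).items = g.items ++ [(node, [])] :=
    PySem.Dict.items_insert_of_not_contains g [] (by simpa using hk)
  simp only [pvUniv, PySem.Dict.keys, PySem.Dict.values, hit]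
  ext x
  simp only [List.mem_toFinset, List.mem_append, List.map_append, List.flatten_append,
    Finset.mem_insert, List.map_cons, List.map_nil, List.flatten_cons, List.flatten_nil,
    List.mem_cons, List.not_mem_nil, or_false, List.mem_singleton]
  tauto

theorem pvRunB_dec_pop (g : PySem.Dict String (List String)) (vis : PySem.Set String)
    (e : String × Bool) (rest : List (String × Bool)) :
    (pvU g rest \ vis.toFinset).card ≤ (pvU g (e :: rest) \ vis.toFinset).card := by
  apply Finset.card_le_card
  apply Finset.sdiff_subset_sdiff _ (Finset.Subset.refl _)
  apply Finset.union_subset_union (Finset.Subset.refl _)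
  intro x hx
  simp only [List.mem_toFinset, List.mem_map] at hx ⊢
  obtain ⟨p, hp, he⟩ := hx
  exact ⟨p, List.mem_cons_of_mem e hp, he⟩

theorem pvRunB_dec_expand (g : PySem.Dict String (List String)) (vis : PySem.Set String)
    (node : String) (rest : List (String × Bool))
    (hv : ¬PySem.Set.contains vis node = true) :
    (pvU (if g.contains node then g else g.insert node [])
        ((g.getD node []).map (fun n => (n, false)) ++ (node, true) :: rest)
      \ (PySem.Set.add vis node).toFinset).card
    < (pvU g ((node, false) :: rest) \ vis.toFinset).card := by
  have hnv : node ∉ vis := fun hm => hv ((PySem.Set.contains_iff vis node).mpr hm)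
  have h1 : (PySem.Set.add vis node).toFinset = insert node vis.toFinset := by
    rw [PySem.Set.add_of_not_mem hnv]
    ext x; simp [List.mem_toFinset, or_comm]
  have hnode : node ∈ pvU g ((node, false) :: rest) := by
    simp [pvU, List.mem_toFinset]
  have hsub : pvU (if g.contains node then g else g.insert node [])
      ((g.getD node []).map (fun n => (n, false)) ++ (node, true) :: rest)
      ⊆ pvU g ((node, false) :: rest) := by
    intro x hx
    simp only [pvU, Finset.mem_union, List.mem_toFinset, List.mem_map] at hx
    rcases hx with hx | ⟨p, hp, he⟩
    · -- from the (possibly grown) universe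
      by_cases hk : g.contains node = true
      · rw [if_pos hk] at hx
        exact Finset.mem_union_left _ hx
      · rw [if_neg hk, pvUniv_insert_empty hk] at hx
        rcases Finset.mem_insert.mp hx with h | h
        · exact h ▸ hnode
        · exact Finset.mem_union_left _ h
    · rcases List.mem_append.mp hp with h | h
      · -- a pushed neighbour: a value of g
        obtain ⟨n, hn, hne⟩ := List.mem_map.mp h
        apply Finset.mem_union_left
        have hx : x = n := by rw [← he, ← hne]
        exact hx ▸ pvGetD_mem_univ hn
      · rcases List.mem_cons.mp h with h2 | h2
        · rw [h2] at he; exact he ▸ hnode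
        · apply Finset.mem_union_right
          simp only [List.mem_toFinset, List.mem_map]
          exact ⟨p, List.mem_cons_of_mem _ h2, he⟩
  have hmem : node ∈ pvU g ((node, false) :: rest) \ vis.toFinset := by
    rw [Finset.mem_sdiff]
    exact ⟨hnode, by simpa [List.mem_toFinset] using hnv⟩
  calc (pvU (if g.contains node then g else g.insert node [])
        ((g.getD node []).map (fun n => (n, false)) ++ (node, true) :: rest)
      \ (PySem.Set.add vis node).toFinset).card
      ≤ ((pvU g ((node, false) :: rest) \ vis.toFinset).erase node).card := by
        apply Finset.card_le_card
        intro x hx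
        rw [Finset.mem_sdiff, h1] at hx
        obtain ⟨hxm, hxn⟩ := hx
        rw [Finset.mem_erase, Finset.mem_sdiff]
        refine ⟨fun he => hxn (he ▸ Finset.mem_insert_self _ _), hsub hxm,
          fun hm => hxn (Finset.mem_insert_of_mem hm)⟩
    _ < _ := Finset.card_erase_lt_of_mem hmem

-- the while-loop body of B, head of the list = top of the Python stack;
-- `none` = the `raise GraphCycleError` branch
def pvRunB : PySem.Dict String (List String) → PySem.Set String → PySem.Set String → List (String × Bool) →
    Option (PySem.Dict String (List String) × PySem.Set String × PySem.Set String)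
  | g, vis, path, [] => some (g, vis, path)
  | g, vis, path, (node, closing) :: rest =>
    if closing then pvRunB g vis (PySem.Set.discard path node) rest   -- on_path.discard(node)
    else if PySem.Set.contains path node then none                     -- raise GraphCycleError
    else if hv : PySem.Set.contains vis node then pvRunB g vis path rest
    else
      pvRunB (if g.contains node then g else g.insert node [])         -- graph[node] inserts a missing key
        (PySem.Set.add vis node) (PySem.Set.add path node)
        ((g.getD node []).map (fun n => (n, false)) ++ (node, true) :: rest)
  termination_by g vis _ stack => ((pvU g stack \ vis.toFinset).card, stack.length)
  decreasing_by
    · rcases Nat.lt_or_eq_of_le (pvRunB_dec_pop g vis (node, closing) rest) with h | h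
      · exact Prod.Lex.left _ _ h
      · rw [h]; exact Prod.Lex.right _ (Nat.lt_succ_self _)
    · rcases Nat.lt_or_eq_of_le (pvRunB_dec_pop g vis (node, closing) rest) with h | h
      · exact Prod.Lex.left _ _ h
      · rw [h]; exact Prod.Lex.right _ (Nat.lt_succ_self _)
    · exact Prod.Lex.left _ _ (pvRunB_dec_expand g vis node rest hv)

-- B's outer loop: `for root in list(graph.keys()): stack = [(root, False)]; while stack: …`
def pvLoopB : PySem.Dict String (List String) → PySem.Set String → PySem.Set String → List String →
    Option (PySem.Dict String (List String))
  | g, _, _, [] => some g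
  | g, vis, path, r :: rs =>
    match pvRunB g vis path [(r, false)] with
    | none => none
    | some (g2, vis2, path2) => pvLoopB g2 vis2 path2 rs

def edges_to_graph_with_cycle_detection_alt (intervals : List (String × String)) : List String × (List (String × List String)) :=
  let gi := intervals.foldl
    (fun (acc : PySem.Dict String (List String) × PySem.Dict String Int) se =>
      let g := acc.1.insert se.1 (acc.1.getD se.1 [] ++ [se.2])
      let ind := acc.2.insert se.2 (acc.2.getD se.2 0 + 1)
      let ind2 := if ind.contains se.1 then ind else ind.insert se.1 0
      (g, ind2))
    (PySem.Dict.mk [], PySem.Dict.mk [])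
  let startNodes := gi.2.keys.filter (fun node => gi.2.getD node 0 == 0)
  match pvLoopB gi.1 PySem.Set.empty PySem.Set.empty gi.1.keys with
  | none => ([], [])    -- raise GraphCycleError (outside Pre_)
  | some g2 => (startNodes, g2.items)

-- ===== PRECONDITION & SPEC =====
-- Pre_ = the input's edge relation is acyclic: exactly the inputs on which Python A returns
-- (on a cycle A raises GraphCycleError).  Decided by a reachability fixpoint: iterate the
-- one-step successor map |ends| times from each edge source and ask whether it reaches itself.
def pvStepF (iv : List (String × String)) (S : Finset String) : Finset String :=
  S ∪ ((iv.filter (fun p => decide (p.1 ∈ S))).map (·.2)).toFinset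

def pvReachF (iv : List (String × String)) (n : String) : Finset String :=
  (pvStepF iv)^[((iv.map (·.2)).toFinset).card] (((iv.filter (fun p => p.1 == n)).map (·.2)).toFinset)

def Pre_edges_to_graph_with_cycle_detection (intervals : List (String × String)) : Prop :=
  ∀ p ∈ intervals, p.1 ∉ pvReachF intervals p.1

instance (intervals : List (String × String)) : Decidable (Pre_edges_to_graph_with_cycle_detection intervals) := by
  unfold Pre_edges_to_graph_with_cycle_detection; infer_instance

def pvWitness_edges_to_graph_with_cycle_detection : (List (String × String)) := [("a", "b"), ("b", "c")]

def Spec_edges_to_graph_with_cycle_detection (intervals : List (String × String)) (out : List String × (List (String × List String))) : Prop := out = edges_to_graph_with_cycle_detection_alt intervals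
instance (intervals : List (String × String)) (out : List String × (List (String × List String))) : Decidable (Spec_edges_to_graph_with_cycle_detection intervals out) := by unfold Spec_edges_to_graph_with_cycle_detection; infer_instance

-- ===== CLAIM (what is proved, stated in full; the proofs are below) =====
def Claim_equal_edges_to_graph_with_cycle_detection : Prop := ∀ (intervals : List (String × String)), Dom_edges_to_graph_with_cycle_detection intervals → Pre_edges_to_graph_with_cycle_detection intervals → Spec_edges_to_graph_with_cycle_detection intervals (edges_to_graph_with_cycle_detection intervals)


-- ===== LEMMAS AND PROOFS =====

-- the edge relation of the input and acyclicity
def pvEr (iv : List (String × String)) (a b : String) : Prop := (a, b) ∈ iv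
def pvAcyc (iv : List (String × String)) : Prop := ∀ n, ¬ Relation.TransGen (pvEr iv) n n
def pvNodes (iv : List (String × String)) : Finset String := ((iv.map (·.1)) ++ (iv.map (·.2))).toFinset

-- the shared build loop of the two ports, named for the proofs
def pvBuild (iv : List (String × String)) : PySem.Dict String (List String) × PySem.Dict String Int :=
  iv.foldl
    (fun (acc : PySem.Dict String (List String) × PySem.Dict String Int) se =>
      let g := acc.1.insert se.1 (acc.1.getD se.1 [] ++ [se.2])
      let ind := acc.2.insert se.2 (acc.2.getD se.2 0 + 1)
      let ind2 := if ind.contains se.1 then ind else ind.insert se.1 0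
      (g, ind2))
    (PySem.Dict.mk [], PySem.Dict.mk [])

-- ===== reachability fixpoint: completeness (TransGen ⊆ pvReachF) =====

theorem pvStep_subset (iv : List (String × String)) (S : Finset String) : S ⊆ pvStepF iv S :=
  Finset.subset_union_left

theorem pvIter_subset (iv : List (String × String)) (X : Finset String) :
    ∀ k, X ⊆ (pvStepF iv)^[k] X := by
  intro k
  induction k with
  | zero => simp
  | succ k ih =>
    rw [Function.iterate_succ_apply']
    exact ih.trans (pvStep_subset iv _)

theorem pvIter_bounded (iv : List (String × String)) (X : Finset String)
    (hX : X ⊆ ((iv.map (·.2)).toFinset)) :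
    ∀ k, (pvStepF iv)^[k] X ⊆ ((iv.map (·.2)).toFinset) := by
  intro k
  induction k with
  | zero => simpa
  | succ k ih =>
    rw [Function.iterate_succ_apply']
    intro x hx
    rcases Finset.mem_union.mp hx with h | h
    · exact ih h
    · simp only [List.mem_toFinset, List.mem_map] at h ⊢
      obtain ⟨p, hp, hpe⟩ := h
      exact ⟨p, (List.mem_filter.mp hp).1, hpe⟩

theorem pvIter_grow (iv : List (String × String)) (X : Finset String) :
    ∀ m, (∀ j < m, (pvStepF iv)^[j] X ≠ (pvStepF iv)^[j+1] X) →
      X.card + m ≤ ((pvStepF iv)^[m] X).card := by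
  intro m
  induction m with
  | zero => simp
  | succ m ih =>
    intro h
    have h1 := ih (fun j hj => h j (Nat.lt_succ_of_lt hj))
    have h2 : ((pvStepF iv)^[m] X).card < ((pvStepF iv)^[m+1] X).card := by
      apply Finset.card_lt_card
      refine Finset.ssubset_iff_subset_ne.mpr ⟨?_, h m (Nat.lt_succ_self m)⟩
      rw [Function.iterate_succ_apply']
      exact pvStep_subset iv _
    omega

theorem pvStep_empty (iv : List (String × String)) : pvStepF iv ∅ = ∅ := by
  simp [pvStepF]

theorem pvIter_fix (iv : List (String × String)) (X : Finset String)
    (hX : X ⊆ ((iv.map (·.2)).toFinset)) :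
    pvStepF iv ((pvStepF iv)^[((iv.map (·.2)).toFinset).card] X) =
      (pvStepF iv)^[((iv.map (·.2)).toFinset).card] X := by
  set K := ((iv.map (·.2)).toFinset).card with hK
  by_cases hex : ∃ j < K, (pvStepF iv)^[j] X = (pvStepF iv)^[j+1] X
  · obtain ⟨j, hj, hfix⟩ := hex
    have hconst : ∀ d, (pvStepF iv)^[j + d] X = (pvStepF iv)^[j] X := by
      intro d
      induction d with
      | zero => rfl
      | succ d ih =>
        calc (pvStepF iv)^[j + (d + 1)] X = (pvStepF iv)^[(j + d) + 1] X := by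
              rw [show j + (d + 1) = (j + d) + 1 by omega]
          _ = pvStepF iv ((pvStepF iv)^[j + d] X) := Function.iterate_succ_apply' _ _ _
          _ = pvStepF iv ((pvStepF iv)^[j] X) := by rw [ih]
          _ = (pvStepF iv)^[j + 1] X := (Function.iterate_succ_apply' _ _ _).symm
          _ = (pvStepF iv)^[j] X := hfix.symm
    have h1 : (pvStepF iv)^[K] X = (pvStepF iv)^[j] X := by
      rw [show K = j + (K - j) by omega]; exact hconst _
    calc pvStepF iv ((pvStepF iv)^[K] X) = pvStepF iv ((pvStepF iv)^[j] X) := by rw [h1]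
      _ = (pvStepF iv)^[j+1] X := (Function.iterate_succ_apply' (pvStepF iv) j X).symm
      _ = (pvStepF iv)^[j] X := hfix.symm
      _ = (pvStepF iv)^[K] X := h1.symm
  · push_neg at hex
    by_cases hXe : X = ∅
    · have hstep : ∀ k, (pvStepF iv)^[k] X = ∅ := by
        intro k
        induction k with
        | zero => simpa
        | succ k ih => rw [Function.iterate_succ_apply', ih, pvStep_empty]
      rw [hstep K]
      exact pvStep_empty iv
    · exfalso
      have hcard : 1 ≤ X.card := Finset.card_pos.mpr (Finset.nonempty_iff_ne_empty.mpr hXe)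
      have h1 := pvIter_grow iv X K hex
      have h2 := Finset.card_le_card (pvIter_bounded iv X hX K)
      omega

theorem pvSuccF_subset (iv : List (String × String)) (n : String) :
    ((iv.filter (fun p => p.1 == n)).map (·.2)).toFinset ⊆ ((iv.map (·.2)).toFinset) := by
  intro x hx
  simp only [List.mem_toFinset, List.mem_map] at hx ⊢
  obtain ⟨p, hp, hpe⟩ := hx
  exact ⟨p, (List.mem_filter.mp hp).1, hpe⟩

theorem pvReach_complete (iv : List (String × String)) (n m : String)
    (h : Relation.TransGen (pvEr iv) n m) : m ∈ pvReachF iv n := by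
  induction h with
  | single hnb =>
    apply pvIter_subset
    simp only [List.mem_toFinset, List.mem_map]
    rename_i b
    exact ⟨(n, b), List.mem_filter.mpr ⟨hnb, by simp⟩, rfl⟩
  | tail hab hbc ih =>
    rename_i b c
    have hfix := pvIter_fix iv _ (pvSuccF_subset iv n)
    rw [pvReachF, ← hfix]
    apply Finset.mem_union_right
    simp only [List.mem_toFinset, List.mem_map]
    exact ⟨(b, c), List.mem_filter.mpr ⟨hbc, by simpa using ih⟩, rfl⟩

theorem pvPre_acyc (iv : List (String × String))
    (hPre : Pre_edges_to_graph_with_cycle_detection iv) : pvAcyc iv := by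
  intro n htg
  obtain ⟨b, hnb, -⟩ : ∃ b, pvEr iv n b ∧ Relation.ReflTransGen (pvEr iv) b n := by
    rcases Relation.TransGen.head'_iff.mp htg with ⟨b, h1, h2⟩
    exact ⟨b, h1, h2⟩
  exact hPre (n, b) hnb (pvReach_complete iv n n htg)

-- ===== the build loop: edge soundness and key origin =====

theorem pvBuild_edges_gen (iv : List (String × String)) :
    ∀ (acc : PySem.Dict String (List String) × PySem.Dict String Int) a b,
      b ∈ PySem.Dict.getD (iv.foldl
        (fun (acc : PySem.Dict String (List String) × PySem.Dict String Int) se =>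
          let g := acc.1.insert se.1 (acc.1.getD se.1 [] ++ [se.2])
          let ind := acc.2.insert se.2 (acc.2.getD se.2 0 + 1)
          let ind2 := if ind.contains se.1 then ind else ind.insert se.1 0
          (g, ind2)) acc).1 a [] →
      b ∈ PySem.Dict.getD acc.1 a [] ∨ (a, b) ∈ iv := by
  induction iv with
  | nil => intro acc a b h; exact Or.inl h
  | cons se tl ih =>
    intro acc a b h
    simp only [List.foldl_cons] at h
    rcases ih _ a b h with h2 | h2
    · by_cases hae : a = se.1
      · subst hae
        rw [PySem.Dict.getD_insert_self] at h2
        rcases List.mem_append.mp h2 with h3 | h3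
        · exact Or.inl h3
        · right
          rw [List.mem_singleton] at h3
          subst h3
          exact List.mem_cons_self
      · rw [PySem.Dict.getD_insert_of_ne _ _ _ hae] at h2
        exact Or.inl h2
    · exact Or.inr (List.mem_cons_of_mem se h2)

theorem pvBuild_edges (iv : List (String × String)) :
    ∀ a b, b ∈ PySem.Dict.getD (pvBuild iv).1 a [] → (a, b) ∈ iv := by
  intro a b h
  rcases pvBuild_edges_gen iv _ a b h with h2 | h2
  · simp [PySem.Dict.getD, PySem.Dict.get?] at h2
  · exact h2

theorem pvBuild_keys_gen (iv : List (String × String)) :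
    ∀ (acc : PySem.Dict String (List String) × PySem.Dict String Int) a,
      a ∈ (iv.foldl
        (fun (acc : PySem.Dict String (List String) × PySem.Dict String Int) se =>
          let g := acc.1.insert se.1 (acc.1.getD se.1 [] ++ [se.2])
          let ind := acc.2.insert se.2 (acc.2.getD se.2 0 + 1)
          let ind2 := if ind.contains se.1 then ind else ind.insert se.1 0
          (g, ind2)) acc).1.keys →
      a ∈ acc.1.keys ∨ a ∈ iv.map (·.1) := by
  induction iv with
  | nil => intro acc a h; exact Or.inl h
  | cons se tl ih =>
    intro acc a h
    simp only [List.foldl_cons] at h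
    rcases ih _ a h with h2 | h2
    · rcases (PySem.Dict.mem_keys_insert _ _ _ _).mp h2 with h3 | h3
      · exact Or.inr (by simp [h3])
      · exact Or.inl h3
    · exact Or.inr (by simpa using Or.inr (by simpa using h2))

theorem pvBuild_keys (iv : List (String × String)) :
    ∀ a ∈ (pvBuild iv).1.keys, a ∈ iv.map (·.1) := by
  intro a h
  rcases pvBuild_keys_gen iv _ a h with h2 | h2
  · simp [PySem.Dict.keys] at h2
  · exact h2

-- one-step unfolding equations for the mutual fuelled dfs
theorem pvDfsA_succ (fuel : Nat) (g : PySem.Dict String (List String)) (vis rec : PySem.Set String) (node : String) :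
  pvDfsA (fuel+1) g vis rec node =
    if PySem.Set.contains rec node then (true, g, vis, rec)
    else if PySem.Set.contains vis node then (false, g, vis, rec)
    else (match pvDfsAList fuel (if g.contains node then g else g.insert node []) (PySem.Set.add vis node) (PySem.Set.add rec node) (PySem.Dict.getD g node []) with
      | (true, g2, vis2, rec2) => (true, g2, vis2, rec2)
      | (false, g2, vis2, rec2) => (false, g2, vis2, PySem.Set.discard rec2 node)) := by
  rw [pvDfsA]

theorem pvDfsAList_cons (fuel : Nat) (g : PySem.Dict String (List String)) (vis rec : PySem.Set String) (n : String) (ns : List String) :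
  pvDfsAList fuel g vis rec (n :: ns) =
    (match pvDfsA fuel g vis rec n with
      | (true, g2, vis2, rec2) => (true, g2, vis2, rec2)
      | (false, g2, vis2, rec2) => pvDfsAList fuel g2 vis2 rec2 ns) := by
  rw [pvDfsAList]

theorem pvDfsAList_nil (fuel : Nat) (g : PySem.Dict String (List String)) (vis rec : PySem.Set String) :
  pvDfsAList fuel g vis rec [] = (false, g, vis, rec) := by
  rw [pvDfsAList]

-- ===== A's dfs returns false on acyclic inputs, rec_stack restored =====

theorem pvDiscard_append {s : PySem.Set String} {x : String} (h : x ∉ s) :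
    PySem.Set.discard (s ++ [x]) x = s := by
  simp only [PySem.Set.discard, List.filter_append, List.filter_singleton]
  simp only [beq_self_eq_true, Bool.not_true, cond_false, List.append_nil]
  rw [List.filter_eq_self]
  intro a ha
  have hax : a ≠ x := fun he => h (he ▸ ha)
  simp [hax]

theorem pvEnsure_hE (iv : List (String × String)) (g : PySem.Dict String (List String)) (node : String)
    (hE : ∀ a b, b ∈ PySem.Dict.getD g a [] → (a, b) ∈ iv) :
    ∀ a b, b ∈ PySem.Dict.getD (if g.contains node then g else g.insert node []) a [] → (a, b) ∈ iv := by
  intro a b h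
  split at h
  · exact hE a b h
  · by_cases hae : a = node
    · subst hae
      rw [PySem.Dict.getD_insert_self] at h
      exact absurd h (List.not_mem_nil)
    · rw [PySem.Dict.getD_insert_of_ne _ _ _ hae] at h
      exact hE a b h

theorem pvMem_nodes_snd {iv : List (String × String)} {a b : String} (h : (a, b) ∈ iv) :
    b ∈ pvNodes iv := by
  simp only [pvNodes, List.mem_toFinset, List.mem_append, List.mem_map]
  exact Or.inr ⟨(a, b), h, rfl⟩

theorem pvMem_nodes_fst {iv : List (String × String)} {a : String} (h : a ∈ iv.map (·.1)) :
    a ∈ pvNodes iv := by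
  simp only [pvNodes, List.mem_toFinset, List.mem_append]
  exact Or.inl h

theorem pvRec_le {iv : List (String × String)} {rec : PySem.Set String}
    (hnd : rec.Nodup) (hsub : ∀ x ∈ rec, x ∈ pvNodes iv) : rec.length ≤ (pvNodes iv).card := by
  have h1 : rec.toFinset.card = rec.length := List.toFinset_card_of_nodup hnd
  have h2 : rec.toFinset ⊆ pvNodes iv := fun x hx => hsub x (List.mem_toFinset.mp hx)
  have := Finset.card_le_card h2
  omega

theorem pvMainAList (iv : List (String × String)) (hacyc : pvAcyc iv) (fuel : Nat)
    (IH : ∀ g vis rec node,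
      (∀ a b, b ∈ PySem.Dict.getD g a [] → (a, b) ∈ iv) →
      rec.Nodup → (∀ x ∈ rec, x ∈ pvNodes iv) →
      (∀ r ∈ rec, Relation.TransGen (pvEr iv) r node) →
      node ∈ pvNodes iv → (pvNodes iv).card < fuel + rec.length →
      ∃ g2 vis2, pvDfsA fuel g vis rec node = (false, g2, vis2, rec) ∧
        (∀ a b, b ∈ PySem.Dict.getD g2 a [] → (a, b) ∈ iv)) :
    ∀ ns g vis (rec : PySem.Set String),
      (∀ a b, b ∈ PySem.Dict.getD g a [] → (a, b) ∈ iv) →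
      rec.Nodup → (∀ x ∈ rec, x ∈ pvNodes iv) →
      (∀ r ∈ rec, ∀ n ∈ ns, Relation.TransGen (pvEr iv) r n) →
      (∀ n ∈ ns, n ∈ pvNodes iv) → (pvNodes iv).card < fuel + rec.length →
      ∃ g2 vis2, pvDfsAList fuel g vis rec ns = (false, g2, vis2, rec) ∧
        (∀ a b, b ∈ PySem.Dict.getD g2 a [] → (a, b) ∈ iv) := by
  intro ns
  induction ns with
  | nil =>
    intro g vis rec hE _ _ _ _ _
    exact ⟨g, vis, pvDfsAList_nil fuel g vis rec, hE⟩
  | cons n ns ih =>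
    intro g vis rec hE hnd hsub hreach hns hfuel
    obtain ⟨g1, vis1, hA, hE1⟩ := IH g vis rec n hE hnd hsub
      (fun r hr => hreach r hr n List.mem_cons_self) (hns n List.mem_cons_self) hfuel
    obtain ⟨g2, vis2, hL, hE2⟩ := ih g1 vis1 rec hE1 hnd hsub
      (fun r hr m hm => hreach r hr m (List.mem_cons_of_mem n hm))
      (fun m hm => hns m (List.mem_cons_of_mem n hm)) hfuel
    refine ⟨g2, vis2, ?_, hE2⟩
    rw [pvDfsAList_cons, hA]
    exact hL

theorem pvMainA (iv : List (String × String)) (hacyc : pvAcyc iv) :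
    ∀ fuel g vis rec node,
      (∀ a b, b ∈ PySem.Dict.getD g a [] → (a, b) ∈ iv) →
      rec.Nodup → (∀ x ∈ rec, x ∈ pvNodes iv) →
      (∀ r ∈ rec, Relation.TransGen (pvEr iv) r node) →
      node ∈ pvNodes iv → (pvNodes iv).card < fuel + rec.length →
      ∃ g2 vis2, pvDfsA fuel g vis rec node = (false, g2, vis2, rec) ∧
        (∀ a b, b ∈ PySem.Dict.getD g2 a [] → (a, b) ∈ iv) := by
  intro fuel
  induction fuel with
  | zero =>
    intro g vis rec node hE hnd hsub hreach hnode hfuel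
    exact absurd (pvRec_le hnd hsub) (by omega)
  | succ fuel ihf =>
    intro g vis rec node hE hnd hsub hreach hnode hfuel
    by_cases hrc : PySem.Set.contains rec node = true
    · exact absurd (hreach node ((PySem.Set.contains_iff rec node).mp hrc))
        (hacyc node)
    · by_cases hvc : PySem.Set.contains vis node = true
      · refine ⟨g, vis, ?_, hE⟩
        rw [pvDfsA_succ, if_neg hrc, if_pos hvc]
      · have hnrec : node ∉ rec := fun hm => hrc ((PySem.Set.contains_iff rec node).mpr hm)
        have hradd : PySem.Set.add rec node = rec ++ [node] := PySem.Set.add_of_not_mem hnrec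
        have hnd' : (PySem.Set.add rec node).Nodup := by
          rw [hradd, List.nodup_append]
          refine ⟨hnd, List.nodup_singleton node, ?_⟩
          intro a ha b hb
          rw [List.mem_singleton] at hb
          exact fun he => hnrec ((he.trans hb) ▸ ha)
        have hsub' : ∀ x ∈ PySem.Set.add rec node, x ∈ pvNodes iv := by
          rw [hradd]
          intro x hx
          rcases List.mem_append.mp hx with h | h
          · exact hsub x h
          · rw [List.mem_singleton] at h; exact h ▸ hnode
        have hE' := pvEnsure_hE iv g node hE
        have hreach' : ∀ r ∈ PySem.Set.add rec node, ∀ m ∈ PySem.Dict.getD g node [],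
            Relation.TransGen (pvEr iv) r m := by
          rw [hradd]
          intro r hr m hm
          have hedge : pvEr iv node m := hE node m hm
          rcases List.mem_append.mp hr with h | h
          · exact Relation.TransGen.tail (hreach r h) hedge
          · rw [List.mem_singleton] at h
            exact h ▸ Relation.TransGen.single hedge
        have hns' : ∀ m ∈ PySem.Dict.getD g node [], m ∈ pvNodes iv :=
          fun m hm => pvMem_nodes_snd (hE node m hm)
        have hfuel' : (pvNodes iv).card < fuel + (PySem.Set.add rec node).length := by
          rw [hradd]; simp only [List.length_append, List.length_singleton]; omega
        obtain ⟨g2, vis2, hL, hE2⟩ := pvMainAList iv hacyc fuel ihf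
          (PySem.Dict.getD g node []) (if g.contains node then g else g.insert node [])
          (PySem.Set.add vis node) (PySem.Set.add rec node)
          hE' hnd' hsub' hreach' hns' hfuel'
        refine ⟨g2, vis2, ?_, hE2⟩
        rw [pvDfsA_succ, if_neg hrc, if_neg hvc]
        simp only [hL]
        rw [hradd, pvDiscard_append hnrec]

-- ===== recursive dfs ↔ B's explicit stack: identical evolution of every piece of state =====

theorem pvRunB_nil (g : PySem.Dict String (List String)) (vis path : PySem.Set String) :
    pvRunB g vis path [] = some (g, vis, path) := by rw [pvRunB]

theorem pvRunB_closing (g : PySem.Dict String (List String)) (vis path : PySem.Set String)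
    (node : String) (rest : List (String × Bool)) :
    pvRunB g vis path ((node, true) :: rest) = pvRunB g vis (PySem.Set.discard path node) rest := by
  rw [pvRunB]; simp

theorem pvRunB_skip {vis path : PySem.Set String} {node : String}
    (hp : ¬PySem.Set.contains path node = true) (hv : PySem.Set.contains vis node = true)
    (g : PySem.Dict String (List String)) (rest : List (String × Bool)) :
    pvRunB g vis path ((node, false) :: rest) = pvRunB g vis path rest := by
  have hp' : node ∉ path := fun hm => hp ((PySem.Set.contains_iff path node).mpr hm)
  have hv' : node ∈ vis := (PySem.Set.contains_iff vis node).mp hv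
  rw [pvRunB]; simp [hp, hv, hp', hv']

theorem pvRunB_expand {g : PySem.Dict String (List String)} {vis path : PySem.Set String} {node : String}
    (hp : ¬PySem.Set.contains path node = true) (hv : ¬PySem.Set.contains vis node = true)
    (rest : List (String × Bool)) :
    pvRunB g vis path ((node, false) :: rest) =
      pvRunB (if g.contains node then g else g.insert node [])
        (PySem.Set.add vis node) (PySem.Set.add path node)
        ((g.getD node []).map (fun n => (n, false)) ++ (node, true) :: rest) := by
  have hp' : node ∉ path := fun hm => hp ((PySem.Set.contains_iff path node).mpr hm)
  have hv' : node ∉ vis := fun hm => hv ((PySem.Set.contains_iff vis node).mpr hm)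
  rw [pvRunB]; simp [hp, hv, hp', hv']

theorem pvDfsA_zero (g : PySem.Dict String (List String)) (vis rec : PySem.Set String) (node : String) :
    pvDfsA 0 g vis rec node = (true, g, vis, rec) := by rw [pvDfsA]

theorem pvCorrBList (fuel : Nat)
    (IH : ∀ (g : PySem.Dict String (List String)) vis rec node g2 vis2 rec2,
      pvDfsA fuel g vis rec node = (false, g2, vis2, rec2) →
      ∀ rest, pvRunB g vis rec ((node, false) :: rest) = pvRunB g2 vis2 rec2 rest) :
    ∀ ns (g : PySem.Dict String (List String)) vis rec g2 vis2 rec2,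
      pvDfsAList fuel g vis rec ns = (false, g2, vis2, rec2) →
      ∀ rest, pvRunB g vis rec (ns.map (fun n => (n, false)) ++ rest) = pvRunB g2 vis2 rec2 rest := by
  intro ns
  induction ns with
  | nil =>
    intro g vis rec g2 vis2 rec2 h rest
    rw [pvDfsAList_nil] at h
    obtain ⟨h2, h3, h4⟩ : g = g2 ∧ vis = vis2 ∧ rec = rec2 :=
      ⟨congrArg (·.2.1) h, congrArg (·.2.2.1) h, congrArg (·.2.2.2) h⟩
    subst h2; subst h3; subst h4
    rw [List.map_nil, List.nil_append]
  | cons n ns ih =>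
    intro g vis rec g2 vis2 rec2 h rest
    rw [pvDfsAList_cons] at h
    rcases hA : pvDfsA fuel g vis rec n with ⟨b, gm, vm, rm⟩
    rw [hA] at h
    cases b with
    | true => exact absurd (congrArg (·.1) h) (by simp)
    | false =>
      simp only at h
      rw [List.map_cons, List.cons_append]
      rw [IH g vis rec n gm vm rm hA (ns.map (fun n => (n, false)) ++ rest)]
      exact ih gm vm rm g2 vis2 rec2 h rest

theorem pvCorrB : ∀ fuel (g : PySem.Dict String (List String)) vis rec node g2 vis2 rec2,
    pvDfsA fuel g vis rec node = (false, g2, vis2, rec2) →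
    ∀ rest, pvRunB g vis rec ((node, false) :: rest) = pvRunB g2 vis2 rec2 rest := by
  intro fuel
  induction fuel with
  | zero =>
    intro g vis rec node g2 vis2 rec2 h
    rw [pvDfsA_zero] at h
    exact absurd (congrArg (·.1) h) (by simp)
  | succ fuel ihf =>
    intro g vis rec node g2 vis2 rec2 h rest
    rw [pvDfsA_succ] at h
    by_cases hrc : PySem.Set.contains rec node = true
    · rw [if_pos hrc] at h
      exact absurd (congrArg (·.1) h) (by simp)
    · rw [if_neg hrc] at h
      by_cases hvc : PySem.Set.contains vis node = true
      · rw [if_pos hvc] at h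
        obtain ⟨h1, h2, h3⟩ : g = g2 ∧ vis = vis2 ∧ rec = rec2 :=
          ⟨congrArg (·.2.1) h, congrArg (·.2.2.1) h, congrArg (·.2.2.2) h⟩
        subst h1; subst h2; subst h3
        exact pvRunB_skip hrc hvc g rest
      · rw [if_neg hvc] at h
        rcases hL : pvDfsAList fuel (if g.contains node then g else g.insert node [])
            (PySem.Set.add vis node) (PySem.Set.add rec node) (PySem.Dict.getD g node []) with
          ⟨b, gm, vm, rm⟩
        rw [hL] at h
        cases b with
        | true => exact absurd (congrArg (·.1) h) (by simp)
        | false =>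
          simp only at h
          obtain ⟨h1, h2, h3⟩ : gm = g2 ∧ vm = vis2 ∧ PySem.Set.discard rm node = rec2 :=
            ⟨congrArg (·.2.1) h, congrArg (·.2.2.1) h, congrArg (·.2.2.2) h⟩
          subst h1; subst h2; subst h3
          rw [pvRunB_expand hrc hvc rest]
          rw [pvCorrBList fuel ihf _ _ _ _ _ _ _ hL ((node, true) :: rest)]
          exact pvRunB_closing _ _ _ _ _

theorem pvCard_lt (iv : List (String × String)) : (pvNodes iv).card < 2 * iv.length + 1 := by
  have := List.toFinset_card_le ((iv.map (·.1)) ++ (iv.map (·.2)))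
  simp only [List.length_append, List.length_map] at this
  simp only [pvNodes]
  omega

theorem pvEmpty_not_contains (k : String) : ¬PySem.Set.contains (PySem.Set.empty : PySem.Set String) k = true := by
  intro h
  have := (PySem.Set.contains_iff _ k).mp h
  simp [PySem.Set.empty] at this

theorem pvTopCorr (iv : List (String × String)) (hacyc : pvAcyc iv) :
    ∀ ks (g : PySem.Dict String (List String)) vis,
      (∀ a b, b ∈ PySem.Dict.getD g a [] → (a, b) ∈ iv) →
      (∀ k ∈ ks, k ∈ pvNodes iv) →
      ∃ gf, pvDetectLoop (2 * iv.length + 1) g vis PySem.Set.empty ks = (false, gf) ∧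
        pvLoopB g vis PySem.Set.empty ks = some gf := by
  intro ks
  induction ks with
  | nil =>
    intro g vis hE hks
    exact ⟨g, by rw [pvDetectLoop], by rw [pvLoopB]⟩
  | cons k ks ih =>
    intro g vis hE hks
    by_cases hv : PySem.Set.contains vis k = true
    · obtain ⟨gf, hA, hB⟩ := ih g vis hE (fun x hx => hks x (List.mem_cons_of_mem k hx))
      refine ⟨gf, ?_, ?_⟩
      · rw [pvDetectLoop, if_pos hv]; exact hA
      · rw [pvLoopB, pvRunB_skip (pvEmpty_not_contains k) hv, pvRunB_nil]
        exact hB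
    · obtain ⟨g2, vis2, hA, hE2⟩ := pvMainA iv hacyc (2 * iv.length + 1) g vis
        PySem.Set.empty k hE List.nodup_nil (by simp [PySem.Set.empty])
        (by simp [PySem.Set.empty]) (hks k List.mem_cons_self)
        (by simpa [PySem.Set.empty] using pvCard_lt iv)
      obtain ⟨gf, hA2, hB2⟩ := ih g2 vis2 hE2 (fun x hx => hks x (List.mem_cons_of_mem k hx))
      refine ⟨gf, ?_, ?_⟩
      · rw [pvDetectLoop, if_neg hv, hA]
        exact hA2
      · rw [pvLoopB, pvCorrB (2 * iv.length + 1) g vis PySem.Set.empty k g2 vis2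
          PySem.Set.empty hA [], pvRunB_nil]
        exact hB2

-- ===== VERDICT (by name: the statement is the Claim_ definition above) =====
theorem edges_to_graph_with_cycle_detection_spec : Claim_equal_edges_to_graph_with_cycle_detection := by
  intro iv hDom hPre
  unfold Spec_edges_to_graph_with_cycle_detection
  have hacyc := pvPre_acyc iv hPre
  have hE : ∀ a b, b ∈ PySem.Dict.getD (pvBuild iv).1 a [] → (a, b) ∈ iv := pvBuild_edges iv
  have hks : ∀ k ∈ (pvBuild iv).1.keys, k ∈ pvNodes iv :=
    fun k hk => pvMem_nodes_fst (pvBuild_keys iv k hk)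
  obtain ⟨gf, hA, hB⟩ := pvTopCorr iv hacyc (pvBuild iv).1.keys (pvBuild iv).1 PySem.Set.empty hE hks
  have hA' : edges_to_graph_with_cycle_detection iv =
      (match pvDetectLoop (2 * iv.length + 1) (pvBuild iv).1 PySem.Set.empty PySem.Set.empty
          (pvBuild iv).1.keys with
        | (true, _) => ([], [])
        | (false, g2) =>
          ((pvBuild iv).2.keys.filter (fun node => (pvBuild iv).2.getD node 0 == 0), g2.items)) := rfl
  have hB' : edges_to_graph_with_cycle_detection_alt iv =
      (match pvLoopB (pvBuild iv).1 PySem.Set.empty PySem.Set.empty (pvBuild iv).1.keys with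
        | none => ([], [])
        | some g2 =>
          ((pvBuild iv).2.keys.filter (fun node => (pvBuild iv).2.getD node 0 == 0), g2.items)) := rfl
  rw [hA', hB', hA, hB]
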